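-- pv_equiv track=rewrite | github.com/neilwj7/advent-of-code-2025 | 9/main.py | covered_h
-- ===== SOURCE A (Python) =====
-- def covered_h(r, c, hw):
--     covered_above = covered_below = False
--     for wall in hw:
--         if not wall[1] <= c <= wall[2]:
--             continue
--         if r == wall[0]:
--             return True
--         elif r > wall[0]:
--             covered_above = True
--         else:
--             covered_below = True
--         if covered_above and covered_below:
--             return True
--     return False
-- ===== SOURCE B (Python) =====
-- def covered_h(r, c, hw):
--     rows = [wall[0] for wall in hw if wall[1] <= c <= wall[2]]
--     if r in rows:
--         return True
--     return any(row < r for row in rows) and any(row > r for row in rows)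
-- ===== Notes on version B (the rewrite author's own statement) =====
-- stated objective: simpler
-- what changed: Replaces the fused single pass with two mutable flags and early returns by an index-then-scan decomposition: first collect the rows of all covering walls, then test exact-row membership and the two any() scans.
import Mathlib
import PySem

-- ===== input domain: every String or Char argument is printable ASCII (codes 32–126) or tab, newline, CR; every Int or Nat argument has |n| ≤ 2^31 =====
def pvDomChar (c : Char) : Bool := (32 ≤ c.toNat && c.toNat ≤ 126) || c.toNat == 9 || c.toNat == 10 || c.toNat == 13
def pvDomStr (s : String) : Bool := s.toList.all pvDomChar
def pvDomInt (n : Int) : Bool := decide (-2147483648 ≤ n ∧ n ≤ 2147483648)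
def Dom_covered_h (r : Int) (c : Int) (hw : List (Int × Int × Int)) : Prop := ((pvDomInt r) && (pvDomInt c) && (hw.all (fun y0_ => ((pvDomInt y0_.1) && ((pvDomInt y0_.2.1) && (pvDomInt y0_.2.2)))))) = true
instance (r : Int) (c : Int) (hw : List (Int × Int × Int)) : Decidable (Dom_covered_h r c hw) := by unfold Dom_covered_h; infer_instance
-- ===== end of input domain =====

-- B replaces A's fused flag-carrying single pass by an index-then-scan decomposition (simpler); same return value.
-- ===== PORT A =====
def covered_h_go (r : Int) (c : Int) (hw : List (Int × Int × Int)) (ca cb : Bool) : Bool :=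
  match hw with
  | [] => false
  | w :: t =>
    if !(decide (w.2.1 ≤ c) && decide (c ≤ w.2.2)) then covered_h_go r c t ca cb
    else if r = w.1 then true
    else
      let ca' := if r > w.1 then true else ca
      let cb' := if r > w.1 then cb else true
      if ca' && cb' then true else covered_h_go r c t ca' cb'

def covered_h (r : Int) (c : Int) (hw : List (Int × Int × Int)) : Bool :=
  covered_h_go r c hw false false

-- ===== PORT B =====
def covered_h_alt (r : Int) (c : Int) (hw : List (Int × Int × Int)) : Bool :=
  let rows := (hw.filter (fun w => decide (w.2.1 ≤ c) && decide (c ≤ w.2.2))).map (·.1)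
  if rows.contains r then true
  else rows.any (fun row => row < r) && rows.any (fun row => row > r)

-- ===== PRECONDITION & SPEC =====
def Spec_covered_h (r : Int) (c : Int) (hw : List (Int × Int × Int)) (out : Bool) : Prop := out = covered_h_alt r c hw
instance (r : Int) (c : Int) (hw : List (Int × Int × Int)) (out : Bool) : Decidable (Spec_covered_h r c hw out) := by unfold Spec_covered_h; infer_instance

-- ===== CLAIM (what is proved, stated in full; the proofs are below) =====
def Claim_equal_covered_h : Prop := ∀ (r : Int) (c : Int) (hw : List (Int × Int × Int)), Dom_covered_h r c hw → Spec_covered_h r c hw (covered_h r c hw)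

-- ===== LEMMAS AND PROOFS =====

-- ===== VERDICT (by name: the statement is the Claim_ definition above) =====
-- Loop invariant: provided the flags are not both set (A would already have returned),
-- the fused pass with flags (ca, cb) equals the index-then-scan form with the flags
-- folded into the two existential scans.
theorem covered_h_go_eq (r c : Int) (hw : List (Int × Int × Int)) (ca cb : Bool)
    (h0 : (ca && cb) = false) :
    covered_h_go r c hw ca cb =
      (let rows := (hw.filter (fun w => decide (w.2.1 ≤ c) && decide (c ≤ w.2.2))).map (·.1)
       rows.contains r ||
         ((ca || rows.any (fun row => row < r)) && (cb || rows.any (fun row => row > r)))) := by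
  induction hw generalizing ca cb with
  | nil =>
    rcases Bool.and_eq_false_iff.mp h0 with h | h <;> simp [covered_h_go, h]
  | cons w t ih =>
    simp only [covered_h_go]
    by_cases hcov : (decide (w.2.1 ≤ c) && decide (c ≤ w.2.2)) = true
    · by_cases hr : r = w.1
      · simp [hcov, hr]
      · have hne : (r == w.1) = false := by simp [hr]
        rcases lt_trichotomy w.1 r with h | h | h
        · have hgt : r > w.1 := h
          by_cases hcb : cb = true
          · simp [hcov, hr, hgt, hcb, hne, show (w.1 < r) from h]
          · simp only [Bool.not_eq_true] at hcb
            subst hcb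
            simp [hcov, hr, hgt, hne, ih true false rfl,
              show ¬ (w.1 > r) by omega]
        · exact absurd h.symm hr
        · have hgt : ¬ (r > w.1) := by omega
          by_cases hca : ca = true
          · simp [hcov, hr, hgt, hca, hne, show (w.1 > r) from h]
          · simp only [Bool.not_eq_true] at hca
            subst hca
            simp [hcov, hr, hgt, hne, ih false true rfl,
              show (w.1 > r) from h]
    · simp [hcov, ih ca cb h0]

theorem covered_h_spec : Claim_equal_covered_h := by
  intro r c hw _
  unfold Spec_covered_h covered_h covered_h_alt
  rw [covered_h_go_eq _ _ _ _ _ rfl]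
  simp
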